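-- pv_equiv track=rewrite | github.com/danangnu/meter_reader | lcd_ocr.py | fill_slots_with_line_hint
-- ===== SOURCE A (Python) =====
-- def fill_slots_with_line_hint(slot_str: str, line_digits: str) -> str:
--     if not slot_str or not line_digits: return slot_str
--     m = len(slot_str); n = len(line_digits)
--     if n < m: return slot_str
--     best = None
--     for i in range(0, n - m + 1):
--         win = line_digits[i:i+m]
--         score = sum(1 for k,ch in enumerate(slot_str) if ch != "?" and ch == win[k])
--         if (best is None) or (score > best[0]): best = (score, i, win)
--     if best is None: return slot_str
--     _, i, win = best
--     out = list(slot_str)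
--     for k,ch in enumerate(out):
--         if ch == "?": out[k] = win[k]
--     return "".join(out)
-- ===== SOURCE B (Python) =====
-- def fill_slots_with_line_hint(slot_str: str, line_digits: str) -> str:
--     if not slot_str or not line_digits:
--         return slot_str
--     m, n = len(slot_str), len(line_digits)
--     if n < m:
--         return slot_str
--     # score table: scores[i] = matches of the non-'?' slots against window i,
--     # built by transposing the loops (per slot character, one pass over all windows)
--     scores = [0] * (n - m + 1)
--     for k, ch in enumerate(slot_str):
--         if ch != "?":
--             scores = [s + (line_digits[i + k] == ch) for i, s in enumerate(scores)]
--     # first argmax (earliest window on ties)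
--     best_i, best_s = 0, scores[0]
--     for i, s in enumerate(scores):
--         if s > best_s:
--             best_i, best_s = i, s
--     win = line_digits[best_i:best_i + m]
--     return "".join(win[k] if ch == "?" else ch for k, ch in enumerate(slot_str))
-- ===== Notes on version B (the rewrite author's own statement) =====
-- stated objective: alternative
-- what changed: Replaces the per-window rescanning loop by a transposed computation: one score table built per non-'?' slot character across all windows at once, followed by a separate first-argmax scan and a single fill pass.
import Mathlib
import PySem

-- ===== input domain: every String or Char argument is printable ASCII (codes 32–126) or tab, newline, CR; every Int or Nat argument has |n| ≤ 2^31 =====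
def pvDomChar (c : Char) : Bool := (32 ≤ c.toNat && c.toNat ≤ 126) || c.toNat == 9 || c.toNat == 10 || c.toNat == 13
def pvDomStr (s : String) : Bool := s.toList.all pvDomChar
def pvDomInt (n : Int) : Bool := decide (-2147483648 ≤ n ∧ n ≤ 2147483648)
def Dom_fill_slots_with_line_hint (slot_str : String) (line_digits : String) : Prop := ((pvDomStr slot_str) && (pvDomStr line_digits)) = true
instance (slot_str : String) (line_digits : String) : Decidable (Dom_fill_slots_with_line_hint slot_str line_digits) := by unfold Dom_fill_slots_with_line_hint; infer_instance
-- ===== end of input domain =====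

-- B replaces A's per-window rescanning by a transposed score-table pass plus a separate
-- first-argmax scan (objective: alternative decomposition, same asymptotic cost).

-- ===== PORT A =====
def fill_slots_with_line_hint (slot_str : String) (line_digits : String) : String :=
  let s := slot_str.toList
  let d := line_digits.toList
  if s.isEmpty || d.isEmpty then slot_str else
  let m := s.length
  let n := d.length
  if n < m then slot_str else
  let best : Option (Nat × Int × List Char) :=
    (PySem.List.pyRange 0 ((n : Int) - (m : Int) + 1) 1).foldl
      (fun best i =>
        let win := PySem.List.slice d (some i) (some (i + (m : Int)))
        let score := (PySem.List.enumerate s 0).foldl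
          (fun (acc : Nat) kc =>
            if kc.2 ≠ '?' ∧ PySem.List.pyGet? win kc.1 = some kc.2 then acc + 1 else acc) 0
        match best with
        | none => some (score, i, win)
        | some b => if score > b.1 then some (score, i, win) else some b)
      none
  match best with
  | none => slot_str
  | some (_, _, win) =>
      -- out[k] = win[k] only for '?' slots; win[k] is always in range here (|win| = m)
      String.ofList ((PySem.List.enumerate s 0).map
        (fun kc => if kc.2 = '?' then (PySem.List.pyGet? win kc.1).getD kc.2 else kc.2))

-- ===== PORT B =====
def fill_slots_with_line_hint_alt (slot_str : String) (line_digits : String) : String :=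
  let s := slot_str.toList
  let d := line_digits.toList
  if s.isEmpty || d.isEmpty then slot_str else
  let m := s.length
  let n := d.length
  if n < m then slot_str else
  let scores : List Nat :=
    (PySem.List.enumerate s 0).foldl
      (fun sc kc =>
        if kc.2 ≠ '?' then
          (PySem.List.enumerate sc 0).map
            (fun is => is.2 + (if PySem.List.pyGet? d (is.1 + kc.1) = some kc.2 then 1 else 0))
        else sc)
      (List.replicate (n - m + 1) 0)
  let bb : Int × Nat :=
    (PySem.List.enumerate scores 0).foldl
      (fun b is => if is.2 > b.2 then (is.1, is.2) else b)
      (0, PySem.List.pyGetD scores 0 0)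
  let win := PySem.List.slice d (some bb.1) (some (bb.1 + (m : Int)))
  String.ofList ((PySem.List.enumerate s 0).map
    (fun kc => if kc.2 = '?' then (PySem.List.pyGet? win kc.1).getD kc.2 else kc.2))

-- ===== PRECONDITION & SPEC =====
def Spec_fill_slots_with_line_hint (slot_str : String) (line_digits : String) (out : String) : Prop := out = fill_slots_with_line_hint_alt slot_str line_digits
instance (slot_str : String) (line_digits : String) (out : String) : Decidable (Spec_fill_slots_with_line_hint slot_str line_digits out) := by unfold Spec_fill_slots_with_line_hint; infer_instance

-- ===== CLAIM (what is proved, stated in full; the proofs are below) =====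
def Claim_equal_fill_slots_with_line_hint : Prop := ∀ (slot_str : String) (line_digits : String), Dom_fill_slots_with_line_hint slot_str line_digits → Spec_fill_slots_with_line_hint slot_str line_digits (fill_slots_with_line_hint slot_str line_digits)

-- ===== LEMMAS AND PROOFS =====

-- the match count of window i: the common value both programs compute per window
def pvG (s d : List Char) (i : Nat) : Nat :=
  (PySem.List.enumerate s 0).countP
    (fun kc => decide (kc.2 ≠ '?' ∧ PySem.List.pyGet? d ((i : Int) + kc.1) = some kc.2))

-- A's loop body, named for the proofs
def pvStepA (s d : List Char) (best : Option (Nat × Int × List Char)) (i : Int) :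
    Option (Nat × Int × List Char) :=
  let win := PySem.List.slice d (some i) (some (i + (s.length : Int)))
  let score := (PySem.List.enumerate s 0).foldl
    (fun (acc : Nat) kc =>
      if kc.2 ≠ '?' ∧ PySem.List.pyGet? win kc.1 = some kc.2 then acc + 1 else acc) 0
  match best with
  | none => some (score, i, win)
  | some b => if score > b.1 then some (score, i, win) else some b

-- B's argmax step, named for the proofs
def pvStepB (b : Int × Nat) (is : Int × Nat) : Int × Nat :=
  if is.2 > b.2 then (is.1, is.2) else b

-- the shared fill pass
def pvFill (slot_str : String) (win : List Char) : String :=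
  String.ofList ((PySem.List.enumerate slot_str.toList 0).map
    (fun kc => if kc.2 = '?' then (PySem.List.pyGet? win kc.1).getD kc.2 else kc.2))

theorem pvA_eq (slot_str line_digits : String) :
    fill_slots_with_line_hint slot_str line_digits =
      (if slot_str.toList.isEmpty || line_digits.toList.isEmpty then slot_str
       else if line_digits.toList.length < slot_str.toList.length then slot_str
       else
         match (PySem.List.pyRange 0 ((line_digits.toList.length : Int) - (slot_str.toList.length : Int) + 1) 1).foldl
             (pvStepA slot_str.toList line_digits.toList) none with
         | none => slot_str
         | some (_, _, win) => pvFill slot_str win) := rfl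

def pvScores (s d : List Char) : List Nat :=
  (PySem.List.enumerate s 0).foldl
    (fun sc kc =>
      if kc.2 ≠ '?' then
        (PySem.List.enumerate sc 0).map
          (fun is => is.2 + (if PySem.List.pyGet? d (is.1 + kc.1) = some kc.2 then 1 else 0))
      else sc)
    (List.replicate (d.length - s.length + 1) 0)

def pvBB (s d : List Char) : Int × Nat :=
  (PySem.List.enumerate (pvScores s d) 0).foldl pvStepB (0, PySem.List.pyGetD (pvScores s d) 0 0)

theorem pvB_eq (slot_str line_digits : String) :
    fill_slots_with_line_hint_alt slot_str line_digits =
      (if slot_str.toList.isEmpty || line_digits.toList.isEmpty then slot_str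
       else if line_digits.toList.length < slot_str.toList.length then slot_str
       else
         pvFill slot_str
           (PySem.List.slice line_digits.toList
             (some (pvBB slot_str.toList line_digits.toList).1)
             (some ((pvBB slot_str.toList line_digits.toList).1 + (slot_str.toList.length : Int))))) := rfl

theorem pv_foldl_ite_add_one_nat {α : Type} (p : α → Prop) [DecidablePred p] :
    ∀ (l : List α) (a : Nat),
      l.foldl (fun acc x => if p x then acc + 1 else acc) a
        = a + l.countP (fun x => decide (p x)) := by
  intro l
  induction l with
  | nil => simp
  | cons x t ih =>
    intro a
    by_cases hx : p x <;> simp [List.foldl_cons, hx, ih] <;> omega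

theorem pv_enum_map {α β : Type} (f : α → β) :
    ∀ (l : List α) (st : Int),
      PySem.List.enumerate (l.map f) st
        = (PySem.List.enumerate l st).map (fun p => (p.1, f p.2)) := by
  intro l
  induction l with
  | nil => intro st; rfl
  | cons x t ih =>
    intro st
    simp [PySem.List.enumerate_cons, ih]

theorem pv_foldl_enum_snd {α β : Type} (l : List α) (st : Int) (F : β → α → β) (init : β) :
    (PySem.List.enumerate l st).foldl (fun b p => F b p.2) init = l.foldl F init := by
  conv_rhs => rw [← PySem.List.map_snd_enumerate l st, List.foldl_map]

theorem pv_enum_range_fst {W : Nat} {p : Int × Nat} (hp : p ∈ PySem.List.enumerate (List.range W) 0) :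
    p.1 = (p.2 : Int) := by
  rcases (PySem.List.mem_enumerate_iff _ _ _).1 hp with ⟨k, hk, rfl⟩
  simp

-- A's per-window score equals pvG
theorem pv_scoreA_eq (s d : List Char) (i : Nat) (_hi : i + s.length ≤ d.length) :
    (PySem.List.enumerate s 0).foldl
      (fun (acc : Nat) kc =>
        if kc.2 ≠ '?' ∧ PySem.List.pyGet? (List.take s.length (List.drop i d)) kc.1 = some kc.2
        then acc + 1 else acc) 0
    = pvG s d i := by
  rw [pv_foldl_ite_add_one_nat, Nat.zero_add]
  unfold pvG
  apply List.countP_congr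
  intro kc hkc
  rcases (PySem.List.mem_enumerate_iff _ _ _).1 hkc with ⟨k, hk, rfl⟩
  have h1 : PySem.List.pyGet? (List.take s.length (List.drop i d)) ((0 : Int) + (k : Int))
      = PySem.List.pyGet? d ((i : Int) + ((0 : Int) + (k : Int))) := by
    have e2 : ((i : Int) + ((0 : Int) + (k : Int))) = (((i + k : Nat)) : Int) := by push_cast; ring
    have e1 : ((0 : Int) + (k : Int)) = ((k : Nat) : Int) := by ring
    rw [e2, e1, PySem.List.pyGet?_natCast, PySem.List.pyGet?_natCast,
      List.getElem?_take, List.getElem?_drop, if_pos hk]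
  simp only [h1]

-- B's score table: folding the transposed pass adds the per-character contributions pointwise
theorem pv_scores_fold (d : List Char) (W : Nat) :
    ∀ (P : List (Int × Char)) (h : Nat → Nat),
      P.foldl
        (fun sc kc =>
          if kc.2 ≠ '?' then
            (PySem.List.enumerate sc 0).map
              (fun is => is.2 + (if PySem.List.pyGet? d (is.1 + kc.1) = some kc.2 then 1 else 0))
          else sc)
        ((List.range W).map h)
      = (List.range W).map
          (fun i => h i +
            P.countP (fun kc => decide (kc.2 ≠ '?' ∧ PySem.List.pyGet? d ((i : Int) + kc.1) = some kc.2))) := by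
  intro P
  induction P with
  | nil => intro h; simp
  | cons kc P ih =>
    intro h
    by_cases hq : kc.2 ≠ '?'
    · rw [List.foldl_cons, if_pos hq]
      have hstep :
          (PySem.List.enumerate ((List.range W).map h) 0).map
              (fun is => is.2 + (if PySem.List.pyGet? d (is.1 + kc.1) = some kc.2 then 1 else 0))
            = (List.range W).map
              (fun i => h i + (if PySem.List.pyGet? d ((i : Int) + kc.1) = some kc.2 then 1 else 0)) := by
        rw [pv_enum_map h (List.range W) 0, List.map_map]
        have : ∀ p ∈ PySem.List.enumerate (List.range W) 0,
            ((fun is => is.2 + (if PySem.List.pyGet? d (is.1 + kc.1) = some kc.2 then 1 else 0)) ∘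
              (fun p => (p.1, h p.2))) p
            = (fun p => h p.2 + (if PySem.List.pyGet? d (((p.2 : Nat) : Int) + kc.1) = some kc.2 then 1 else 0)) p := by
          intro p hp
          simp only [Function.comp]
          rw [pv_enum_range_fst hp]
        rw [List.map_congr_left this]
        conv_rhs => rw [← PySem.List.map_snd_enumerate (List.range W) 0, List.map_map]
        rfl
      rw [hstep, ih]
      apply List.map_congr_left
      intro i _
      rw [List.countP_cons]
      by_cases hc : PySem.List.pyGet? d ((i : Int) + kc.1) = some kc.2
      · simp [hc, hq]; omega
      · simp [hc, hq]
    · rw [List.foldl_cons, if_neg hq, ih]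
      apply List.map_congr_left
      intro i _
      rw [List.countP_cons]
      simp at hq
      simp [hq]

-- main loop correspondence: A's best-window fold vs B's argmax fold over the score table
theorem pv_main_fold (s d : List Char) :
    ∀ (l : List Nat), (∀ i ∈ l, i + s.length ≤ d.length) →
    ∀ (bs : Nat) (jA : Int) (iB : Nat),
    ∃ (sc' : Nat) (jA' : Int) (iB' : Nat),
      ((l.map (fun (k : Nat) => (k : Int))).foldl (pvStepA s d)
          (some (bs, jA, List.take s.length (List.drop iB d)))
        = some (sc', jA', List.take s.length (List.drop iB' d)))
      ∧ (l.foldl (fun (b : Int × Nat) (i : Nat) => pvStepB b ((i : Int), pvG s d i)) ((iB : Int), bs) = ((iB' : Int), sc')) := by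
  intro l
  induction l with
  | nil =>
    intro _ bs jA iB
    exact ⟨bs, jA, iB, rfl, rfl⟩
  | cons i t ih =>
    intro hl bs jA iB
    have hi : i + s.length ≤ d.length := hl i (List.mem_cons_self)
    have ht : ∀ j ∈ t, j + s.length ≤ d.length := fun j hj => hl j (List.mem_cons_of_mem _ hj)
    have hwin : PySem.List.slice d (some (i : Int)) (some ((i : Int) + (s.length : Int)))
        = List.take s.length (List.drop i d) := PySem.List.slice_natCast_add d i s.length
    have hstepA : pvStepA s d (some (bs, jA, List.take s.length (List.drop iB d))) (i : Int)
        = (if pvG s d i > bs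
            then some (pvG s d i, (i : Int), List.take s.length (List.drop i d))
            else some (bs, jA, List.take s.length (List.drop iB d))) := by
      simp only [pvStepA, hwin, pv_scoreA_eq s d i hi]
    have hstepB : pvStepB ((iB : Int), bs) ((i : Int), pvG s d i)
        = (if pvG s d i > bs then ((i : Int), pvG s d i) else ((iB : Int), bs)) := rfl
    by_cases hgt : pvG s d i > bs
    · rcases ih ht (pvG s d i) (i : Int) i with ⟨sc', jA', iB', hA, hB⟩
      refine ⟨sc', jA', iB', ?_, ?_⟩
      · rw [List.map_cons, List.foldl_cons, hstepA, if_pos hgt]; exact hA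
      · rw [List.foldl_cons, hstepB, if_pos hgt]; exact hB
    · rcases ih ht bs jA iB with ⟨sc', jA', iB', hA, hB⟩
      refine ⟨sc', jA', iB', ?_, ?_⟩
      · rw [List.map_cons, List.foldl_cons, hstepA, if_neg hgt]; exact hA
      · rw [List.foldl_cons, hstepB, if_neg hgt]; exact hB

theorem pv_scores_eq (s d : List Char) :
    pvScores s d = (List.range (d.length - s.length + 1)).map (pvG s d) := by
  unfold pvScores
  rw [show (List.replicate (d.length - s.length + 1) (0 : Nat))
        = (List.range (d.length - s.length + 1)).map (fun _ => (0 : Nat)) from by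
      simp [List.map_const']]
  rw [pv_scores_fold]
  apply List.map_congr_left
  intro i _
  simp [pvG]

theorem pv_main_fold0 (s d : List Char) (l : List Nat)
    (hl : ∀ i ∈ l, i + s.length ≤ d.length) (h0 : s.length ≤ d.length) :
    ∃ (sc' : Nat) (jA' : Int) (iB' : Nat),
      (((0 :: l).map (fun (k : Nat) => (k : Int))).foldl (pvStepA s d) none
        = some (sc', jA', List.take s.length (List.drop iB' d)))
      ∧ ((0 :: l).foldl (fun (b : Int × Nat) (i : Nat) => pvStepB b ((i : Int), pvG s d i))
          ((0 : Int), pvG s d 0) = ((iB' : Int), sc')) := by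
  have hstep0 : pvStepA s d none (((0 : Nat) : Int))
      = some (pvG s d 0, ((0 : Nat) : Int), List.take s.length (List.drop 0 d)) := by
    simp only [pvStepA]
    rw [PySem.List.slice_natCast_add d 0 s.length, pv_scoreA_eq s d 0 (by omega)]
  have hstep0B : pvStepB ((0 : Int), pvG s d 0) (((0 : Nat) : Int), pvG s d 0)
      = (((0 : Nat) : Int), pvG s d 0) := by
    simp [pvStepB]
  rw [List.map_cons, List.foldl_cons, List.foldl_cons, hstep0, hstep0B]
  exact pv_main_fold s d l hl (pvG s d 0) ((0 : Nat) : Int) 0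

theorem pv_final (s d : List Char) (h : s.length ≤ d.length) :
    ∃ (sc' : Nat) (jA' : Int) (iB' : Nat),
      ((PySem.List.pyRange 0 ((d.length : Int) - (s.length : Int) + 1) 1).foldl (pvStepA s d) none
        = some (sc', jA', List.take s.length (List.drop iB' d)))
      ∧ pvBB s d = ((iB' : Int), sc') := by
  have hr : ((d.length : Int) - (s.length : Int) + 1) = (((d.length - s.length + 1 : Nat)) : Int) := by
    omega
  have hBfold : pvBB s d
      = (List.range (d.length - s.length + 1)).foldl
          (fun (b : Int × Nat) (i : Nat) => pvStepB b ((i : Int), pvG s d i))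
          ((0 : Int), pvG s d 0) := by
    unfold pvBB
    rw [pv_scores_eq]
    rw [pv_enum_map (pvG s d) (List.range (d.length - s.length + 1)) 0, List.foldl_map]
    have hget : ((List.range (d.length - s.length + 1)).map (pvG s d)).getD 0 0 = pvG s d 0 := by
      rw [List.getD_eq_getElem?_getD, List.getElem?_map,
        List.getElem?_range (show 0 < d.length - s.length + 1 by omega)]
      rfl
    rw [PySem.List.pyGetD_zero, hget]
    rw [PySem.List.foldl_congr_mem _ _
        (fun (b : Int × Nat) (p : Int × Nat) => pvStepB b ((p.2 : Int), pvG s d p.2)) _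
        (by
          intro acc p hp
          simp only []
          rw [pv_enum_range_fst hp])]
    rw [pv_foldl_enum_snd (List.range (d.length - s.length + 1)) 0
      (fun (b : Int × Nat) (i : Nat) => pvStepB b ((i : Int), pvG s d i)) _]
  rw [hr, PySem.List.pyRange_zero_nat, hBfold]
  rw [List.range_eq_range', List.range'_succ]
  rcases pv_main_fold0 s d (List.range' 1 (d.length - s.length))
      (by
        intro i hi
        rw [List.mem_range'_1] at hi
        omega) h with ⟨sc', jA', iB', hA, hB⟩
  exact ⟨sc', jA', iB', hA, hB⟩

-- ===== VERDICT (by name: the statement is the Claim_ definition above) =====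
theorem fill_slots_with_line_hint_spec : Claim_equal_fill_slots_with_line_hint := by
  intro slot_str line_digits _
  unfold Spec_fill_slots_with_line_hint
  rw [pvA_eq, pvB_eq]
  by_cases h0 : (slot_str.toList.isEmpty || line_digits.toList.isEmpty) = true
  · rw [if_pos h0, if_pos h0]
  · rw [if_neg h0, if_neg h0]
    by_cases h1 : line_digits.toList.length < slot_str.toList.length
    · rw [if_pos h1, if_pos h1]
    · rw [if_neg h1, if_neg h1]
      rcases pv_final slot_str.toList line_digits.toList (Nat.le_of_not_lt h1) with
        ⟨sc', jA', iB', hA, hB⟩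
      rw [hA, hB]
      simp only []
      rw [PySem.List.slice_natCast_add line_digits.toList iB' slot_str.toList.length]
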